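-- pv_equiv track=rewrite | github.com/DanaSergali/kili | hw7/homework_slovari.py | count_without_omni
-- ===== SOURCE A (Python) =====
-- def count_without_omni(words,omni):
--     without={}
--     for word in omni:
--         if word[4:] in words:
--                 for s in words:
--                     if s==word[4:]:
--                         if s in without:
--                             without[s]+=1
--                         else:
--                             without[s]=1
--     return without
-- ===== SOURCE B (Python) =====
-- def count_without_omni(words, omni):
--     wc = {}
--     for w in words:
--         wc[w] = wc.get(w, 0) + 1
--     oc = {}
--     for w in omni:
--         s = w[4:]
--         oc[s] = oc.get(s, 0) + 1
--     return {s: c * wc[s] for s, c in oc.items() if s in wc}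
-- ===== Notes on version B (the rewrite author's own statement) =====
-- stated objective: faster
-- what changed: Replaces A's nested scan of words for every omni element by two frequency tables (Counter of words, Counter of omni suffixes) combined key-by-key in one pass: result[suf] = suffix-frequency * word-frequency.
import Mathlib
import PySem

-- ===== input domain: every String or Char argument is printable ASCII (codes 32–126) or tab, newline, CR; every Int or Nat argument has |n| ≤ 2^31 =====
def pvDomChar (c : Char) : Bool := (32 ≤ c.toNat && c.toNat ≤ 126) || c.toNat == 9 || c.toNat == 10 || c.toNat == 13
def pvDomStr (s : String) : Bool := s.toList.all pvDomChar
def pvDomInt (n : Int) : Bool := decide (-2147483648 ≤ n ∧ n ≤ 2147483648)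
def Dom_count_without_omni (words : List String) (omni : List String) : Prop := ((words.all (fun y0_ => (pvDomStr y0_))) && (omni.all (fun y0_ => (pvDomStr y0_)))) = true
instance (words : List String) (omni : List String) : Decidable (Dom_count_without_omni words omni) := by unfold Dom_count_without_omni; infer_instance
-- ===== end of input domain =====

-- B replaces A's nested scan of `words` per omni element by two frequency tables (Counter-style
-- dicts) combined key-by-key in one pass: result[suf] = omni-suffix-count * word-count.

-- ===== PORT A =====
-- Literal port of A: for each word in omni, if word[4:] is in words, scan all of words and
-- bump without[s] for each occurrence s == word[4:].
def count_without_omni (words : List String) (omni : List String) : List (String × Int) :=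
  let without : PySem.Dict String Int :=
    omni.foldl (fun without word =>
      if words.contains (PySem.Str.slice word (some 4) none) then
        words.foldl (fun without s =>
          if s == PySem.Str.slice word (some 4) none then
            if without.contains s then without.modify s 0 (· + 1)
            else without.insert s 1
          else without) without
      else without) PySem.Dict.empty
  without.items

-- ===== PORT B =====
-- Literal port of Source B: wc = counter of words, oc = counter of omni suffixes, then one pass over
-- oc's items building the result dict (wc[s] is wc.getD s 0; the guard guarantees the key is present).
def count_without_omni_alt (words : List String) (omni : List String) : List (String × Int) :=
  let wc : PySem.Dict String Int := words.foldl (fun d w => d.modify w 0 (· + 1)) PySem.Dict.empty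
  let oc : PySem.Dict String Int :=
    omni.foldl (fun d w => d.modify (PySem.Str.slice w (some 4) none) 0 (· + 1)) PySem.Dict.empty
  (oc.items.foldl (fun r p => if wc.contains p.1 then r.insert p.1 (p.2 * wc.getD p.1 0) else r)
    (PySem.Dict.empty : PySem.Dict String Int)).items

-- ===== PRECONDITION & SPEC =====
def Spec_count_without_omni (words : List String) (omni : List String) (out : List (String × Int)) : Prop := out = count_without_omni_alt words omni
instance (words : List String) (omni : List String) (out : List (String × Int)) : Decidable (Spec_count_without_omni words omni out) := by unfold Spec_count_without_omni; infer_instance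

-- ===== CLAIM (what is proved, stated in full; the proofs are below) =====
def Claim_equal_count_without_omni : Prop := ∀ (words : List String) (omni : List String), Dom_count_without_omni words omni → Spec_count_without_omni words omni (count_without_omni words omni)

-- ===== LEMMAS AND PROOFS =====

-- A's two-branch update (bump if present, insert 1 if not) is exactly `modify s 0 (· + 1)`.
theorem step_eq_modify (d : PySem.Dict String Int) (s : String) :
    (if d.contains s then d.modify s 0 (· + 1) else d.insert s 1) = d.modify s 0 (· + 1) := by
  by_cases h : d.contains s = true
  · simp [h]
  · have h' : d.contains s = false := by simpa using h
    have hg : d.getD s 0 = 0 := by simp [pysem, h']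
    have : d.modify s 0 (· + 1) = d.insert s (d.getD s 0 + 1) := PySem.Dict.ext_iff.mpr rfl
    rw [this, hg]
    simp [h']

-- two modifies at the same key compose
theorem modify_modify_self (d : PySem.Dict String Int) (s : String) (f g : Int → Int) :
    (d.modify s 0 f).modify s 0 g = d.modify s 0 (fun v => g (f v)) := by
  have h1 : d.modify s 0 f = d.insert s (f (d.getD s 0)) := PySem.Dict.ext_iff.mpr rfl
  have h2 : (d.modify s 0 f).modify s 0 g
      = (d.modify s 0 f).insert s (g ((d.modify s 0 f).getD s 0)) := PySem.Dict.ext_iff.mpr rfl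
  have h3 : d.modify s 0 (fun v => g (f v)) = d.insert s (g (f (d.getD s 0))) := PySem.Dict.ext_iff.mpr rfl
  rw [h2, PySem.Dict.getD_modify_self, h1, h3, PySem.Dict.insert_insert_self]

-- a loop of `modify t (· + 1)` at one key adds the number of hits
theorem inner_loop_eq (t : String) (l : List String) (d : PySem.Dict String Int) :
    l.foldl (fun w s => if s == t then w.modify s 0 (· + 1) else w) d
    = if l.count t = 0 then d else d.modify t 0 (· + (l.count t : Int)) := by
  induction l generalizing d with
  | nil => simp
  | cons x xs ih =>
    by_cases hx : x = t
    · subst hx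
      simp only [List.foldl_cons, beq_self_eq_true, if_true, List.count_cons_self]
      rw [ih]
      by_cases h0 : xs.count x = 0
      · simp [h0]
      · have hne : xs.count x + 1 ≠ 0 := by omega
        rw [if_neg h0, if_neg hne, modify_modify_self]
        congr 1
        funext v
        push_cast
        ring
    · have hbx : (x == t) = false := by simpa using hx
      simp only [List.foldl_cons, hbx, Bool.false_eq_true, if_false]
      rw [ih, List.count_cons_of_ne hx]

-- keyed modify-fold: final value at v counts the elements whose key is v
theorem getD_modify_fold (M : List String) (k : String → String) (f : String → Int)
    (d : PySem.Dict String Int) (v : String) :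
    (M.foldl (fun d w => d.modify (k w) 0 (· + f (k w))) d).getD v 0
      = d.getD v 0 + ((M.map k).count v : Int) * f v := by
  induction M generalizing d with
  | nil => simp
  | cons x xs ih =>
    simp only [List.foldl_cons, List.map_cons]
    rw [ih, PySem.Dict.getD_modify]
    by_cases hv : v = k x
    · subst hv
      rw [if_pos rfl, List.count_cons_self]
      push_cast
      ring
    · rw [if_neg hv, List.count_cons_of_ne (fun h => hv h.symm)]

-- set(filter) = filter(set): first occurrences survive filtering
theorem ofList_filter (p : String → Bool) (l : List String) :
    PySem.Set.ofList (l.filter p) = (PySem.Set.ofList l).filter p := by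
  have key : ∀ (l : List String) (s : List String),
      (l.filter p).foldl PySem.Set.add (s.filter p) = (l.foldl PySem.Set.add s).filter p := by
    intro l
    induction l with
    | nil => intro s; simp
    | cons x xs ih =>
      intro s
      by_cases hx : p x = true
      · have hadd : (PySem.Set.add s x).filter p = PySem.Set.add (s.filter p) x := by
          rw [PySem.Set.add_eq_ite, PySem.Set.add_eq_ite]
          by_cases hm : x ∈ s
          · simp [hm, List.mem_filter, hx]
          · have hnm : x ∉ s.filter p := fun h => hm (List.mem_of_mem_filter h)
            simp [hm, hnm, List.filter_append, hx]
        simp only [List.filter_cons, hx, if_true, List.foldl_cons]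
        rw [← ih (PySem.Set.add s x), hadd]
      · have hx' : p x = false := by simpa using hx
        have hadd : (PySem.Set.add s x).filter p = s.filter p := by
          rw [PySem.Set.add_eq_ite]
          by_cases hm : x ∈ s
          · simp [hm]
          · simp [hm, List.filter_append, hx']
        simp only [List.filter_cons, hx', Bool.false_eq_true, if_false, List.foldl_cons]
        rw [← ih (PySem.Set.add s x), hadd]
  simpa using key l []

-- a keyed modify-fold from empty, as an items list
theorem modify_fold_items (M : List String) (k : String → String) (f : String → Int) :
    ((M.foldl (fun d w => d.modify (k w) 0 (· + f (k w))) (PySem.Dict.empty : PySem.Dict String Int)).items)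
      = (PySem.Set.ofList (M.map k)).map (fun s => (s, ((M.map k).count s : Int) * f s)) := by
  set D := M.foldl (fun d w => d.modify (k w) 0 (· + f (k w))) (PySem.Dict.empty : PySem.Dict String Int) with hD
  have hkeys : D.keys = PySem.Set.ofList (M.map k) := by
    have := PySem.Dict.keys_foldl_modify_key (l := M) (key := k)
      (d0 := (0 : Int)) (f := fun _ w => (· + f (k w))) (d := (PySem.Dict.empty : PySem.Dict String Int))
    simpa [PySem.Dict.keys_empty, PySem.Set.ofList] using this
  have hnd : D.keys.Nodup := by
    rw [hkeys]; exact PySem.Set.nodup_ofList (M.map k)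
  rw [PySem.Dict.items_eq_map_keys D hnd 0, hkeys]
  apply List.map_congr_left
  intro s _
  rw [hD, getD_modify_fold M k f PySem.Dict.empty s]
  simp

-- characterisation of port A's result
theorem count_without_omni_eq (words omni : List String) :
    count_without_omni words omni
      = (PySem.Set.ofList ((omni.map (fun w => PySem.Str.slice w (some 4) none)).filter
            (fun s => words.contains s))).map
          (fun s => (s, ((omni.map (fun w => PySem.Str.slice w (some 4) none)).count s : Int)
            * (words.count s : Int))) := by
  have hfun : (fun (without : PySem.Dict String Int) (word : String) =>
      if words.contains (PySem.Str.slice word (some 4) none) then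
        words.foldl (fun without s =>
          if s == PySem.Str.slice word (some 4) none then
            if without.contains s then without.modify s 0 (· + 1)
            else without.insert s 1
          else without) without
      else without)
      = (fun (d : PySem.Dict String Int) (word : String) =>
          if words.contains (PySem.Str.slice word (some 4) none) then
            d.modify (PySem.Str.slice word (some 4) none) 0
              (· + (words.count (PySem.Str.slice word (some 4) none) : Int))
          else d) := by
    funext d word
    by_cases h : words.contains (PySem.Str.slice word (some 4) none) = true
    · rw [if_pos h, if_pos h]
      have hstep : (fun (without : PySem.Dict String Int) (s : String) =>
          if s == PySem.Str.slice word (some 4) none then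
            if without.contains s then without.modify s 0 (· + 1)
            else without.insert s 1
          else without)
          = (fun (w : PySem.Dict String Int) (s : String) =>
              if s == PySem.Str.slice word (some 4) none then w.modify s 0 (· + 1) else w) := by
        funext w s
        by_cases hs : (s == PySem.Str.slice word (some 4) none) = true
        · rw [if_pos hs, if_pos hs, step_eq_modify]
        · have hs' : (s == PySem.Str.slice word (some 4) none) = false := by simpa using hs
          simp [hs']
      rw [hstep, inner_loop_eq]
      have hmem : PySem.Str.slice word (some 4) none ∈ words := by simpa using h
      have hpos : 0 < words.count (PySem.Str.slice word (some 4) none) :=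
        List.count_pos_iff.mpr hmem
      rw [if_neg (by omega)]
    · rw [if_neg h, if_neg h]
  show (omni.foldl _ PySem.Dict.empty).items = _
  rw [hfun, PySem.List.foldl_if_eq_foldl_filter,
    modify_fold_items (omni.filter (fun word => words.contains (PySem.Str.slice word (some 4) none)))
      (fun w => PySem.Str.slice w (some 4) none) (fun s => (words.count s : Int))]
  have hfm : ((omni.filter (fun w => words.contains (PySem.Str.slice w (some 4) none))).map
        (fun w => PySem.Str.slice w (some 4) none))
      = (omni.map (fun w => PySem.Str.slice w (some 4) none)).filter (fun s => words.contains s) := by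
    rw [List.filter_map]
    rfl
  rw [hfm]
  apply List.map_congr_left
  intro s hs
  have hp : words.contains s = true := by
    have : s ∈ (omni.map (fun w => PySem.Str.slice w (some 4) none)).filter (fun s => words.contains s) := by
      simpa [PySem.Set.mem_ofList] using hs
    exact (List.mem_filter.mp this).2
  rw [List.count_filter]
  have hmem : s ∈ words := by simpa using hp
  simp [hmem]

-- characterisation of port B's result
theorem count_without_omni_alt_eq (words omni : List String) :
    count_without_omni_alt words omni
      = ((PySem.Set.ofList (omni.map (fun w => PySem.Str.slice w (some 4) none))).filter
            (fun s => words.contains s)).map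
          (fun s => (s, ((omni.map (fun w => PySem.Str.slice w (some 4) none)).count s : Int)
            * (words.count s : Int))) := by
  have hwc : words.foldl (fun d w => d.modify w 0 (· + 1)) PySem.Dict.empty
      = PySem.Dict.counter words := (PySem.Dict.counter_eq_foldl words).symm
  have hoc : omni.foldl (fun d w => d.modify (PySem.Str.slice w (some 4) none) 0 (· + 1)) PySem.Dict.empty
      = PySem.Dict.counter (omni.map (fun w => PySem.Str.slice w (some 4) none)) := by
    rw [PySem.Dict.counter_eq_foldl, List.foldl_map]
  show ((_ : PySem.Dict String Int).items.foldl _ PySem.Dict.empty).items = _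
  rw [hwc, hoc, PySem.List.foldl_if_eq_foldl_filter, PySem.Dict.items_counter]
  have hpred : (fun (p : String × Int) => (PySem.Dict.counter words).contains p.1)
      = (fun (p : String × Int) => words.contains p.1) := by
    funext p
    exact PySem.Dict.contains_counter words p.1
  rw [hpred, List.filter_map,
    PySem.Dict.items_foldl_insert_fresh _ _ _ _
      (by intro a _; simp [pysem])
      (by
        rw [List.map_map]
        simpa [Function.comp_def] using
          (PySem.Set.nodup_ofList (omni.map (fun w => PySem.Str.slice w (some 4) none))).filter
            ((fun (p : String × Int) => words.contains p.1) ∘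
              (fun k => (k, ((omni.map (fun w => PySem.Str.slice w (some 4) none)).count k : Int)))))]
  have hempty : (PySem.Dict.empty : PySem.Dict String Int).items = [] := rfl
  rw [hempty, List.nil_append, List.map_map]
  rw [List.filter_congr (fun x _ => (rfl :
    ((fun (p : String × Int) => words.contains p.1) ∘
      (fun k => (k, ((omni.map (fun w => PySem.Str.slice w (some 4) none)).count k : Int)))) x
    = (fun s => words.contains s) x))]
  apply List.map_congr_left
  intro s hs
  simp [PySem.Dict.getD_counter]

-- ===== VERDICT (by name: the statement is the Claim_ definition above) =====
theorem count_without_omni_spec : Claim_equal_count_without_omni := by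
  intro words omni _
  unfold Spec_count_without_omni
  rw [count_without_omni_eq, count_without_omni_alt_eq, ofList_filter]
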